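-- pv_equiv track=rewrite | github.com/csinva/imodels | imodels/util/prune.py | find_similar_rulesets
-- ===== SOURCE A (Python) =====
-- from collections import Counter
--
-- def find_similar_rulesets(rules, max_depth_duplication=None):
--     """Create clusters of rules using a decision tree based
--     on the terms of the rules
--
--     Parameters
--     ----------
--     rules : List, List of rules
--             The rules that should be splitted in subsets of similar rules
--
--     Returns
--     -------
--     rules : List of list of rules
--             The different set of rules. Each set should be homogeneous
--
--     """
--
--     def split_with_best_feature(rules, depth, exceptions=[]):
--         """
--         Method to find a split of rules given most represented feature
--         """
--         if depth == 0:
--             return rules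
--
--         rulelist = [rule.split(' and ') for rule, score in rules]
--         terms = [t.split(' ')[0] for term in rulelist for t in term]
--         counter = Counter(terms)
--         # Drop exception list
--         for exception in exceptions:
--             del counter[exception]
--
--         if len(counter) == 0:
--             return rules
--
--         most_represented_term = counter.most_common()[0][0]
--
--         # Proceed to split
--         rules_splitted = [[], [], []]
--         for rule in rules:
--             if (most_represented_term + ' <=') in rule[0]:
--                 rules_splitted[0].append(rule)
--             elif (most_represented_term + ' >') in rule[0]:
--                 rules_splitted[1].append(rule)
--             else:
--                 rules_splitted[2].append(rule)
--         new_exceptions = exceptions + [most_represented_term]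
--
--         # Choose best term
--         return [split_with_best_feature(ruleset,
--                                         depth - 1,
--                                         exceptions=new_exceptions)
--                 for ruleset in rules_splitted]
--
--     def breadth_first_search(rules, leaves=None):
--         if len(rules) == 0 or not isinstance(rules[0], list):
--             if len(rules) > 0:
--                 return leaves.append(rules)
--         else:
--             for rules_child in rules:
--                 breadth_first_search(rules_child, leaves=leaves)
--         return leaves
--
--     leaves = []
--     res = split_with_best_feature(rules, max_depth_duplication)
--     breadth_first_search(res, leaves=leaves)
--     return leaves
-- ===== SOURCE B (Python) =====
-- from collections import Counter
--
-- def find_similar_rulesets(rules, max_depth_duplication=None):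
--     """Cluster rules by greedily splitting on the most common term.
--
--     Single traversal that collects leaves directly (no nested tree, no
--     BFS flatten); the most common term is found by max() over a filtered
--     Counter instead of deleting exceptions and sorting.
--     """
--     leaves = []
--
--     def collect(rules, depth, exceptions):
--         counts = Counter(t.split(' ')[0]
--                          for rule, _ in rules
--                          for t in rule.split(' and ')
--                          if t.split(' ')[0] not in exceptions)
--         if depth == 0 or not counts:
--             if rules:
--                 leaves.append(rules)
--             return
--         best = max(counts.items(), key=lambda kv: kv[1])[0]
--         le, gt = best + ' <=', best + ' >'
--         g0 = [r for r in rules if le in r[0]]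
--         g1 = [r for r in rules if le not in r[0] and gt in r[0]]
--         g2 = [r for r in rules if le not in r[0] and gt not in r[0]]
--         new_exc = exceptions + [best]
--         for g in (g0, g1, g2):
--             collect(g, depth - 1, new_exc)
--
--     collect(rules, max_depth_duplication, [])
--     return leaves
-- ===== Notes on version B (the rewrite author's own statement) =====
-- stated objective: simpler
-- what changed: B replaces A's build-a-nested-tree-then-recursively-flatten design with a single recursive pass that collects non-empty leaf subsets directly, counts terms by filtering exceptions during counting instead of deleting them afterwards, and picks the most common term with max() instead of sorting the whole counter.
import Mathlib
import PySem

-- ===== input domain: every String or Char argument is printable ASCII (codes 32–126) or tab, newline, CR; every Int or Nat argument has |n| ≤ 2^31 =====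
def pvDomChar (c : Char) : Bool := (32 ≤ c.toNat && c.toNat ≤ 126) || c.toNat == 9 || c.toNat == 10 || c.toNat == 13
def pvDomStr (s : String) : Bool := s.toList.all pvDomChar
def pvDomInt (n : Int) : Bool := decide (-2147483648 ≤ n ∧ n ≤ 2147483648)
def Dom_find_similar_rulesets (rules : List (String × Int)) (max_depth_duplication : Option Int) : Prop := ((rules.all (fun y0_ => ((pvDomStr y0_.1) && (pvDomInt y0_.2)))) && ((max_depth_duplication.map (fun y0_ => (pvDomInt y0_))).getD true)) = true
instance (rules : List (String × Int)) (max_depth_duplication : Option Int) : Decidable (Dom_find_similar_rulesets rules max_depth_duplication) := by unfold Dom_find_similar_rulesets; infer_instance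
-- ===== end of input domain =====

-- B replaces A's build-a-nested-tree-then-flatten design by one recursive pass that
-- collects the non-empty leaf subsets directly (objective: simpler).
-- Both ports carry a fuel argument only to make the recursion total; the fuel
-- (number of terms + 1) is never exhausted, since each recursion level removes one
-- distinct term from the live counter.

-- ===== PORT A =====
-- terms = [t.split(' ')[0] for term in [rule.split(' and ') for rule, score in rules] for t in term]
def pvTermsA (rules : List (String × Int)) : List String :=
  (rules.map (fun p => (PySem.Str.split? p.1 " and ").getD [])).flatMap
    (fun term => term.map (fun t => PySem.List.pyGetD ((PySem.Str.split? t " ").getD []) 0 ""))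

-- result of split_with_best_feature: either a set of rules (leaf) or a 3-way split
inductive pvRTree : Type
  | leaf : List (String × Int) → pvRTree
  | node : pvRTree → pvRTree → pvRTree → pvRTree
deriving DecidableEq, Repr

def pvSplitA (fuel : Nat) (rules : List (String × Int)) (depth : Option Int)
    (excs : List String) : pvRTree :=
  match fuel with
  | 0 => .leaf rules         -- never reached: fuel bounds the recursion depth
  | fuel + 1 =>
    if depth = some 0 then .leaf rules
    else
      let counter := excs.foldl (fun d e => d.erase e) (PySem.Dict.counter (pvTermsA rules))
      if counter.size = 0 then .leaf rules
      else
        -- most_common()[0][0] : head of the stable descending sort of the items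
        let most := (PySem.List.pyGetD
          (PySem.List.sorted counter.items (fun kv => kv.2) true) 0 ("", 0)).1
        let s := rules.foldl
          (fun (acc : List (String × Int) × List (String × Int) × List (String × Int)) rule =>
            if PySem.Str.isIn (most ++ " <=") rule.1 then (acc.1 ++ [rule], acc.2.1, acc.2.2)
            else if PySem.Str.isIn (most ++ " >") rule.1 then (acc.1, acc.2.1 ++ [rule], acc.2.2)
            else (acc.1, acc.2.1, acc.2.2 ++ [rule]))
          ([], [], [])
        let nd := depth.map (· - 1)
        let ne := excs ++ [most]
        .node (pvSplitA fuel s.1 nd ne) (pvSplitA fuel s.2.1 nd ne) (pvSplitA fuel s.2.2 nd ne)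

def pvBfsA : pvRTree → List (List (String × Int)) → List (List (String × Int))
  | .leaf rs, leaves => if rs.length > 0 then leaves ++ [rs] else leaves
  | .node a b c, leaves => pvBfsA c (pvBfsA b (pvBfsA a leaves))

def find_similar_rulesets (rules : List (String × Int)) (max_depth_duplication : Option Int) :
    List (List (String × Int)) :=
  pvBfsA (pvSplitA ((pvTermsA rules).length + 1) rules max_depth_duplication []) []

-- ===== PORT B =====
-- Counter(t.split(' ')[0] for rule, _ in rules for t in rule.split(' and ') if … not in exceptions)
def pvTermsB (rules : List (String × Int)) (excs : List String) : List String :=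
  rules.flatMap (fun p =>
    (((PySem.Str.split? p.1 " and ").getD []).map
        (fun t => PySem.List.pyGetD ((PySem.Str.split? t " ").getD []) 0 "")).filter
      (fun t => !excs.contains t))

def pvCollectB (fuel : Nat) (rules : List (String × Int)) (depth : Option Int)
    (excs : List String) (acc : List (List (String × Int))) : List (List (String × Int)) :=
  match fuel with
  | 0 => if rules.isEmpty then acc else acc ++ [rules]   -- never reached (fuel suffices)
  | fuel + 1 =>
    let cnt := PySem.Dict.counter (pvTermsB rules excs)
    if depth = some 0 ∨ cnt.size = 0 then
      if rules.isEmpty then acc else acc ++ [rules]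
    else
      let best := ((PySem.List.max? cnt.items (fun kv => kv.2)).getD ("", 0)).1
      let le := best ++ " <="
      let gt := best ++ " >"
      let g0 := rules.filter (fun r => PySem.Str.isIn le r.1)
      let g1 := rules.filter (fun r => !PySem.Str.isIn le r.1 && PySem.Str.isIn gt r.1)
      let g2 := rules.filter (fun r => !PySem.Str.isIn le r.1 && !PySem.Str.isIn gt r.1)
      let nd := depth.map (· - 1)
      let ne := excs ++ [best]
      pvCollectB fuel g2 nd ne (pvCollectB fuel g1 nd ne (pvCollectB fuel g0 nd ne acc))

def find_similar_rulesets_alt (rules : List (String × Int)) (max_depth_duplication : Option Int) :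
    List (List (String × Int)) :=
  pvCollectB ((pvTermsB rules []).length + 1) rules max_depth_duplication [] []

-- ===== PRECONDITION & SPEC =====
-- Pre_ excludes only max_depth_duplication = None with non-empty rules, where Python A
-- raises TypeError on depth - 1 (None minus int); with empty rules the recursion stops
-- before the subtraction, so those inputs stay inside Pre_.
def Pre_find_similar_rulesets (rules : List (String × Int)) (max_depth_duplication : Option Int) : Prop :=
  max_depth_duplication ≠ none ∨ rules = []
instance (rules : List (String × Int)) (max_depth_duplication : Option Int) : Decidable (Pre_find_similar_rulesets rules max_depth_duplication) := by unfold Pre_find_similar_rulesets; infer_instance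

def pvWitness_find_similar_rulesets : (List (String × Int)) × Option Int :=
  ([("a <= 3 and b > 1", 1), ("a > 3", 0)], some 2)

def Spec_find_similar_rulesets (rules : List (String × Int)) (max_depth_duplication : Option Int) (out : List (List (String × Int))) : Prop := out = find_similar_rulesets_alt rules max_depth_duplication
instance (rules : List (String × Int)) (max_depth_duplication : Option Int) (out : List (List (String × Int))) : Decidable (Spec_find_similar_rulesets rules max_depth_duplication out) := by unfold Spec_find_similar_rulesets; infer_instance

-- ===== CLAIM (what is proved, stated in full; the proofs are below) =====
def Claim_equal_find_similar_rulesets : Prop := ∀ (rules : List (String × Int)) (max_depth_duplication : Option Int), Dom_find_similar_rulesets rules max_depth_duplication → Pre_find_similar_rulesets rules max_depth_duplication → Spec_find_similar_rulesets rules max_depth_duplication (find_similar_rulesets rules max_depth_duplication)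

-- ===== LEMMAS AND PROOFS =====

-- first-occurrence dedup commutes with filter
theorem pv_ofList_filter (xs : List String) (q : String → Bool) :
    PySem.Set.ofList (xs.filter q) = (PySem.Set.ofList xs).filter q := by
  induction xs using List.reverseRecOn with
  | nil => simp [PySem.Set.ofList]
  | append_singleton xs x ih =>
    rw [List.filter_append]
    by_cases hq : q x
    · have h1 : PySem.Set.ofList (xs.filter q ++ [x].filter q)
          = PySem.Set.add (PySem.Set.ofList (xs.filter q)) x := by
        simp [hq, PySem.Set.ofList, List.foldl_append]
      have h2 : PySem.Set.ofList (xs ++ [x]) = PySem.Set.add (PySem.Set.ofList xs) x := by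
        simp [PySem.Set.ofList, List.foldl_append]
      rw [h1, h2, ih]
      by_cases hc : x ∈ xs
      · simp [PySem.Set.add, hc, hq]
      · simp [PySem.Set.add, hc, hq, List.filter_append]
    · have h2 : PySem.Set.ofList (xs ++ [x]) = PySem.Set.add (PySem.Set.ofList xs) x := by
        simp [PySem.Set.ofList, List.foldl_append]
      rw [h2]
      simp only [PySem.Set.add]
      split_ifs with hc
      · simp [hq, ih]
      · simp [hq, ih, List.filter_append]

-- xs[0] with a default is head-with-default
theorem pv_pyGetD_zero {α : Type} (l : List α) (d : α) :
    PySem.List.pyGetD l 0 d = (l.head?).getD d := by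
  cases l <;> simp [PySem.List.pyGetD, PySem.List.pyGet?, PySem.List.pyIdx?]

-- B's filtered term list is A's term list, filtered
theorem pvTermsB_eq (rules : List (String × Int)) (excs : List String) :
    pvTermsB rules excs = (pvTermsA rules).filter (fun t => !excs.contains t) := by
  simp [pvTermsB, pvTermsA, List.filter_flatMap, List.flatMap_map]

-- folding `erase` filters the items
theorem pv_items_foldl_erase {ν : Type} (excs : List String) (d : PySem.Dict String ν) :
    (excs.foldl (fun d e => d.erase e) d).items
      = d.items.filter (fun p => !excs.contains p.1) := by
  induction excs generalizing d with
  | nil => simp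
  | cons e es ih =>
    rw [List.foldl_cons, ih]
    show (d.erase e).items.filter _ = _
    simp only [PySem.Dict.erase, List.filter_filter]
    congr 1
    funext p
    by_cases hpe : p.1 = e <;> simp [hpe]

-- A's exception-erased counter has the same items as B's counter of the filtered terms
theorem pv_counter_items_eq (xs : List String) (excs : List String) :
    (excs.foldl (fun d e => d.erase e) (PySem.Dict.counter xs)).items
      = (PySem.Dict.counter (xs.filter (fun t => !excs.contains t))).items := by
  rw [pv_items_foldl_erase, PySem.Dict.items_counter, PySem.Dict.items_counter]
  rw [pv_ofList_filter]
  rw [List.filter_map]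
  apply List.map_congr_left
  intro k hk
  have hq : (!excs.contains k) = true := by
    have := (List.mem_filter.1 hk).2
    simpa using this
  congr 1
  exact_mod_cast (List.count_filter (p := fun t => !excs.contains t) (a := k) (l := xs) hq).symm

-- head of the stable descending sort is the first maximum
theorem pv_head_sorted_rev {α : Type} (xs : List α) (key : α → Int) :
    (PySem.List.sorted xs key true).head? = PySem.List.max? xs key := by
  induction xs using List.reverseRecOn with
  | nil => simp [PySem.List.sorted, PySem.List.max?]
  | append_singleton xs x ih =>
    have hs : PySem.List.sorted (xs ++ [x]) key true
        = PySem.List.insertBy (fun a b => decide (key b < key a)) x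
            (PySem.List.sorted xs key true) := by
      simp [PySem.List.sorted, List.foldl_append]
    have hm : PySem.List.max? (xs ++ [x]) key
        = match PySem.List.max? xs key with
          | none => some x
          | some m => if key m < key x then some x else some m := by
      unfold PySem.List.max?
      rw [List.foldl_append]
      rfl
    rw [hs, hm]
    cases h : PySem.List.sorted xs key true with
    | nil =>
      rw [h] at ih
      simp at ih
      rw [← ih]
      simp [PySem.List.insertBy]
    | cons m t =>
      rw [h] at ih
      simp at ih
      rw [← ih]
      simp only [PySem.List.insertBy]
      split_ifs with hlt <;> simp_all

-- the three-way partition loop computes three filters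
theorem pv_partition (f g : (String × Int) → Bool) (l : List (String × Int))
    (a b c : List (String × Int)) :
    l.foldl (fun (acc : List (String × Int) × List (String × Int) × List (String × Int)) r =>
        if f r then (acc.1 ++ [r], acc.2.1, acc.2.2)
        else if g r then (acc.1, acc.2.1 ++ [r], acc.2.2)
        else (acc.1, acc.2.1, acc.2.2 ++ [r])) (a, b, c)
      = (a ++ l.filter f, b ++ l.filter (fun r => !f r && g r),
         c ++ l.filter (fun r => !f r && !g r)) := by
  induction l generalizing a b c with
  | nil => simp
  | cons r t ih =>
    by_cases hf : f r
    · simp [hf, ih]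
    · by_cases hg : g r <;> simp [hf, hg, ih]

-- main invariant: the direct collector equals build-tree-then-flatten
theorem pv_main (fuel : Nat) : ∀ (rules : List (String × Int)) (depth : Option Int)
    (excs : List String) (acc : List (List (String × Int))),
    pvCollectB fuel rules depth excs acc = pvBfsA (pvSplitA fuel rules depth excs) acc := by
  induction fuel with
  | zero =>
    intro rules depth excs acc
    cases rules <;> simp [pvCollectB, pvSplitA, pvBfsA]
  | succ fuel ih =>
    intro rules depth excs acc
    have hitems : (PySem.Dict.counter (pvTermsB rules excs)).items
        = (excs.foldl (fun d e => d.erase e) (PySem.Dict.counter (pvTermsA rules))).items := by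
      rw [pvTermsB_eq, pv_counter_items_eq]
    simp only [pvCollectB, pvSplitA]
    by_cases hd : depth = some 0
    · simp only [hd]
      cases rules <;> simp [pvBfsA]
    · by_cases hz : (excs.foldl (fun d e => d.erase e)
          (PySem.Dict.counter (pvTermsA rules))).size = 0
      · have hz' : (PySem.Dict.counter (pvTermsB rules excs)).size = 0 := by
          show (PySem.Dict.counter (pvTermsB rules excs)).items.length = 0
          rw [hitems]; exact hz
        simp only [hd, hz, hz']
        cases rules <;> simp [pvBfsA]
      · have hz' : ¬ (PySem.Dict.counter (pvTermsB rules excs)).size = 0 := by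
          show ¬ (PySem.Dict.counter (pvTermsB rules excs)).items.length = 0
          rw [hitems]; exact hz
        have hbest : ((PySem.List.max? (PySem.Dict.counter (pvTermsB rules excs)).items
              (fun kv => kv.2)).getD ("", 0)).1
            = (PySem.List.pyGetD (PySem.List.sorted
                (excs.foldl (fun d e => d.erase e)
                  (PySem.Dict.counter (pvTermsA rules))).items (fun kv => kv.2) true)
                0 ("", 0)).1 := by
          rw [pv_pyGetD_zero, ← pv_head_sorted_rev, hitems]
        simp only [hd, hz, hz', if_false, or_self]
        rw [hbest]
        rw [pv_partition (fun r => PySem.Str.isIn ((PySem.List.pyGetD (PySem.List.sorted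
                (excs.foldl (fun d e => d.erase e)
                  (PySem.Dict.counter (pvTermsA rules))).items (fun kv => kv.2) true)
                0 ("", 0)).1 ++ " <=") r.1)
              (fun r => PySem.Str.isIn ((PySem.List.pyGetD (PySem.List.sorted
                (excs.foldl (fun d e => d.erase e)
                  (PySem.Dict.counter (pvTermsA rules))).items (fun kv => kv.2) true)
                0 ("", 0)).1 ++ " >") r.1) rules [] [] []]
        simp only [List.nil_append, pvBfsA]
        rw [ih, ih, ih]

-- ===== VERDICT (by name: the statement is the Claim_ definition above) =====
theorem find_similar_rulesets_spec : Claim_equal_find_similar_rulesets := by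
  intro rules mdd _ _
  unfold Spec_find_similar_rulesets find_similar_rulesets find_similar_rulesets_alt
  rw [pv_main]
  congr 2
  rw [pvTermsB_eq]
  simp
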